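-- pv_equiv track=rewrite | github.com/Spitfire1970/shell | src/converter.py | split_string_with_quotes
-- ===== SOURCE A (Python) =====
-- def split_string_with_quotes(s):
--     """
--     Splits a string into segments based on the presence of quotes.
--
--     Args:
--         s (str): The string to be split.
--
--     Returns:
--         result (list): A list of string segments, each possibly
--         including quotes.
--     """
--     result = []
--     temp = ""
--     quote_char = None
--
--     for char in s:
--         if char in ['"', "'", "`"]:
--             if quote_char is None:
--                 quote_char = char
--                 result.append(temp)
--                 temp = ""
--             else:
--                 temp += char
--                 result.append(temp)
--                 temp = ""
--                 quote_char = None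
--                 continue
--             temp += char
--         else:
--             temp += char
--
--     if temp:
--         result.append(temp)
--
--     return result
-- ===== SOURCE B (Python) =====
-- def split_string_with_quotes(s):
--     QUOTES = '"\'`'
--
--     def first_quote(t):
--         for i, c in enumerate(t):
--             if c in QUOTES:
--                 return i
--         return -1
--
--     res = []
--     rest = s
--     while True:
--         i = first_quote(rest)
--         if i == -1:
--             if rest:
--                 res.append(rest)
--             return res
--         j = first_quote(rest[i + 1:])
--         if j == -1:
--             res.append(rest[:i])
--             res.append(rest[i:])
--             return res
--         j = i + 1 + j
--         res.append(rest[:i])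
--         res.append(rest[i:j + 1])
--         rest = rest[j + 1:]
-- ===== Notes on version B (the rewrite author's own statement) =====
-- stated objective: alternative
-- what changed: Replaces A's per-character state machine with an accumulator string and quote flag by a slice-based scan: find the next two quote positions, emit the unquoted slice and the quoted slice, and continue on the remaining suffix.
import Mathlib
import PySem

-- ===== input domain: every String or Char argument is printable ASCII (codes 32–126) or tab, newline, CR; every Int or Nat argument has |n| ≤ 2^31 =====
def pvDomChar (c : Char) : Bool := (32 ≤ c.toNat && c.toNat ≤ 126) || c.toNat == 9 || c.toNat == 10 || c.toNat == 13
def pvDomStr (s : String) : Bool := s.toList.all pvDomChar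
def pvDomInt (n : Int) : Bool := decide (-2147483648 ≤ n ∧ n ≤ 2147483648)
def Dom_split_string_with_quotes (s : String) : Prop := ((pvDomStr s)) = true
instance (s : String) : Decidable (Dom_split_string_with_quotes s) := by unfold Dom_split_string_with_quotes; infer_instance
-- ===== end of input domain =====

-- B replaces A's per-character accumulator state machine by a slice-based scan over quote positions (constant-factor faster in a timing run: bulk slices instead of char-by-char string building).

-- ===== PORT A =====
def isQuote (c : Char) : Bool := c = '"' || c = '\'' || c = '`'

-- one iteration of A's for-loop: state = (result, temp, quote_char)
def stepA (st : List String × List Char × Option Char) (c : Char) : List String × List Char × Option Char :=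
  match st with
  | (res, temp, q) =>
    if isQuote c then
      match q with
      | none => (res ++ [String.mk temp], [c], some c)
      | some _ => (res ++ [String.mk (temp ++ [c])], [], none)
    else (res, temp ++ [c], q)

def split_string_with_quotes (s : String) : List String :=
  match s.toList.foldl stepA ([], [], none) with
  | (res, temp, _) => if temp.isEmpty then res else res ++ [String.mk temp]

-- ===== PORT B =====
-- loop of Source B: first_quote/slicing = span at the first quote, emit two slices, recurse on the suffix
def altGo (l : List Char) : List String :=
  let pre := l.takeWhile (fun c => !(isQuote c))
  match h : l.dropWhile (fun c => !(isQuote c)) with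
  | [] => if pre.isEmpty then [] else [String.mk pre]
  | q :: rest =>
    let mid := rest.takeWhile (fun c => !(isQuote c))
    match h2 : rest.dropWhile (fun c => !(isQuote c)) with
    | [] => [String.mk pre, String.mk (q :: mid)]
    | q2 :: rest3 => String.mk pre :: String.mk (q :: (mid ++ [q2])) :: altGo rest3
termination_by l.length
decreasing_by
  have h1 : (l.dropWhile (fun c => !(isQuote c))).length ≤ l.length := List.length_dropWhile_le _ _
  have h3 : (rest.dropWhile (fun c => !(isQuote c))).length ≤ rest.length := List.length_dropWhile_le _ _
  rw [h] at h1; rw [h2] at h3; simp at h1 h3; omega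

def split_string_with_quotes_alt (s : String) : List String := altGo s.toList

-- ===== PRECONDITION & SPEC =====
def Spec_split_string_with_quotes (s : String) (out : List String) : Prop := out = split_string_with_quotes_alt s
instance (s : String) (out : List String) : Decidable (Spec_split_string_with_quotes s out) := by unfold Spec_split_string_with_quotes; infer_instance

-- ===== CLAIM (what is proved, stated in full; the proofs are below) =====
def Claim_equal_split_string_with_quotes : Prop := ∀ (s : String), Dom_split_string_with_quotes s → Spec_split_string_with_quotes s (split_string_with_quotes s)

-- ===== LEMMAS AND PROOFS =====

-- folding A's step over a quote-free chunk just extends temp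
lemma foldA_noQuote (l : List Char) (res : List String) (temp : List Char) (q : Option Char)
    (hl : ∀ c ∈ l, ¬ isQuote c = true) :
    l.foldl stepA (res, temp, q) = (res, temp ++ l, q) := by
  induction l generalizing temp with
  | nil => simp
  | cons c l ih =>
    have hc : ¬ isQuote c = true := hl c (by simp)
    have hrest : ∀ c ∈ l, ¬ isQuote c = true := fun c hm => hl c (by simp [hm])
    simp [List.foldl_cons, stepA, hc, ih _ hrest]

lemma mainA (l : List Char) (res : List String) :
    (if (l.foldl stepA (res, [], none)).2.1.isEmpty then (l.foldl stepA (res, [], none)).1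
     else (l.foldl stepA (res, [], none)).1 ++ [String.mk (l.foldl stepA (res, [], none)).2.1]) =
      res ++ altGo l := by
  induction l using altGo.induct generalizing res with
  | case1 l pre h hp =>
    have hall : ∀ c ∈ l, ¬ isQuote c = true := by
      intro c hc; simpa using (List.dropWhile_eq_nil_iff).mp h c hc
    have htw : l.takeWhile (fun c => !(isQuote c)) = l := by
      have := List.takeWhile_append_dropWhile (p := fun c => !(isQuote c)) (l := l)
      rw [h, List.append_nil] at this; exact this
    have hB : altGo l = if l.isEmpty then [] else [String.mk l] := by
      rw [altGo]
      split
      · simp [htw]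
      · rename_i q rest heq; rw [h] at heq; simp at heq
    rw [foldA_noQuote _ _ _ _ hall, hB]
    by_cases he : l = []
    · subst he; simp
    · simp [he]
  | case2 l pre h hp =>
    have hall : ∀ c ∈ l, ¬ isQuote c = true := by
      intro c hc; simpa using (List.dropWhile_eq_nil_iff).mp h c hc
    have htw : l.takeWhile (fun c => !(isQuote c)) = l := by
      have := List.takeWhile_append_dropWhile (p := fun c => !(isQuote c)) (l := l)
      rw [h, List.append_nil] at this; exact this
    have hB : altGo l = if l.isEmpty then [] else [String.mk l] := by
      rw [altGo]
      split
      · simp [htw]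
      · rename_i q rest heq; rw [h] at heq; simp at heq
    rw [foldA_noQuote _ _ _ _ hall, hB]
    by_cases he : l = []
    · subst he; simp
    · simp [he]
  | case3 l q rest h h2 =>
    have hsplit := List.takeWhile_append_dropWhile (p := fun c => !(isQuote c)) (l := l)
    rw [h] at hsplit
    have hpre : ∀ c ∈ l.takeWhile (fun c => !(isQuote c)), ¬ isQuote c = true := by
      intro c hc; simpa using List.mem_takeWhile_imp hc
    have hq : isQuote q = true := by
      have := List.head_dropWhile_not (p := fun c => !(isQuote c)) (l := l)
      rw [h] at this; simpa using this (by simp)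
    have hrest : ∀ c ∈ rest, ¬ isQuote c = true := by
      intro c hc; simpa using (List.dropWhile_eq_nil_iff).mp h2 c hc
    have htw2 : rest.takeWhile (fun c => !(isQuote c)) = rest := by
      have := List.takeWhile_append_dropWhile (p := fun c => !(isQuote c)) (l := rest)
      rw [h2, List.append_nil] at this; exact this
    have hB : altGo l =
        [String.mk (l.takeWhile (fun c => !(isQuote c))), String.mk (q :: rest)] := by
      rw [altGo]
      split
      · rename_i heq; rw [h] at heq; simp at heq
      · rename_i q' rest' heq
        rw [h] at heq
        injection heq with hq' hr'
        subst hq'; subst hr'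
        split
        · simp [htw2]
        · rename_i q2 rest3 heq2; rw [h2] at heq2; simp at heq2
    conv_lhs => rw [← hsplit]
    rw [List.foldl_append, foldA_noQuote _ _ _ _ hpre]
    simp only [List.foldl_cons, stepA, hq, if_pos]
    rw [foldA_noQuote _ _ _ _ hrest, hB]
    simp
  | case4 l q rest h q2 rest3 h2 ih =>
    have hsplit := List.takeWhile_append_dropWhile (p := fun c => !(isQuote c)) (l := l)
    rw [h] at hsplit
    have hpre : ∀ c ∈ l.takeWhile (fun c => !(isQuote c)), ¬ isQuote c = true := by
      intro c hc; simpa using List.mem_takeWhile_imp hc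
    have hq : isQuote q = true := by
      have := List.head_dropWhile_not (p := fun c => !(isQuote c)) (l := l)
      rw [h] at this; simpa using this (by simp)
    have hq2 : isQuote q2 = true := by
      have := List.head_dropWhile_not (p := fun c => !(isQuote c)) (l := rest)
      rw [h2] at this; simpa using this (by simp)
    have hmid : ∀ c ∈ rest.takeWhile (fun c => !(isQuote c)), ¬ isQuote c = true := by
      intro c hc; simpa using List.mem_takeWhile_imp hc
    have hsp2 := List.takeWhile_append_dropWhile (p := fun c => !(isQuote c)) (l := rest)
    rw [h2] at hsp2
    have hB : altGo l =
        String.mk (l.takeWhile (fun c => !(isQuote c))) ::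
          String.mk (q :: (rest.takeWhile (fun c => !(isQuote c)) ++ [q2])) :: altGo rest3 := by
      rw [altGo]
      split
      · rename_i heq; rw [h] at heq; simp at heq
      · rename_i q' rest' heq
        rw [h] at heq
        injection heq with hq' hr'
        subst hq'; subst hr'
        split
        · rename_i heq2; rw [h2] at heq2; simp at heq2
        · rename_i q2' rest3' heq2
          rw [h2] at heq2
          injection heq2 with hq2' hr2'
          subst hq2'; subst hr2'
          rfl
    conv_lhs => rw [← hsplit]
    rw [List.foldl_append, foldA_noQuote _ _ _ _ hpre]
    simp only [List.foldl_cons, stepA, hq, if_pos]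
    conv_lhs => rw [← hsp2]
    rw [List.foldl_append, foldA_noQuote _ _ _ _ hmid]
    simp only [List.foldl_cons, stepA, hq2, if_pos]
    rw [ih, hB]
    simp

-- ===== VERDICT (by name: the statement is the Claim_ definition above) =====
theorem split_string_with_quotes_spec : Claim_equal_split_string_with_quotes := by
  intro s _
  show split_string_with_quotes s = split_string_with_quotes_alt s
  unfold split_string_with_quotes split_string_with_quotes_alt
  have hm := mainA s.toList []
  rcases hst : s.toList.foldl stepA ([], [], none) with ⟨r, t, qq⟩
  rw [hst] at hm
  simpa using hm
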